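-- pv_equiv track=rewrite | github.com/nigalanakis/Crystal_Math | src/csd_structure_validator.py | _get_unique_species
-- ===== SOURCE A (Python) =====
-- from typing import Optional, Set
--
-- def _get_unique_species(formula: str) -> Set[str]:
--     """
--     Parse a chemical formula into unique element symbols.
--
--     Parameters
--     ----------
--     formula : str
--         Chemical formula string (e.g., "C6H12O6").
--
--     Returns
--     -------
--     Set[str]
--         Unique element symbols extracted from the formula.
--
--     Notes
--     -----
--     - Element symbols start with an uppercase letter, optionally followed by lowercase letters.
--     - Numeric characters are ignored.
--     """
--     species = set()
--     current = ''
--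
--     for char in formula:
--         if char.isupper():
--             if current:
--                 species.add(current)
--             current = char
--         elif char.islower():
--             current += char
--         elif current:
--             species.add(current)
--             current = ''
--
--     if current:
--         species.add(current)
--
--     return species
-- ===== SOURCE B (Python) =====
-- def _get_unique_species(formula: str):
--     transformed = ''.join(
--         ' ' + c if c.isupper() else (c if c.islower() else ' ')
--         for c in formula
--     )
--     return set(transformed.split())
-- ===== Notes on version B (the rewrite author's own statement) =====
-- stated objective: idiomatic
-- what changed: Replaces A's stateful accumulator loop with explicit flushes by a stateless decomposition: map each character to a separator-inserting transform, split the result on whitespace, and take the set of tokens.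
import Mathlib
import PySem

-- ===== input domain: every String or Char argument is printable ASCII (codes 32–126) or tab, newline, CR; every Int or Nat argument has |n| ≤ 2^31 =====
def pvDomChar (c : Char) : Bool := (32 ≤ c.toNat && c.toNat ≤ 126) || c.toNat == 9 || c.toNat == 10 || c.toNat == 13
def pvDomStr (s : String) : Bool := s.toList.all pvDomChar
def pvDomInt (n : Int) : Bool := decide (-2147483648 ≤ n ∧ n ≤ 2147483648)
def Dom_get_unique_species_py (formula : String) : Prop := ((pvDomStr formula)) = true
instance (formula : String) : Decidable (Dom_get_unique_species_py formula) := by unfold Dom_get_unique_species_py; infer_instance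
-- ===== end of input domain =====

-- B replaces A's stateful accumulator/flush loop by a stateless 'insert separators, then tokenize' decomposition
-- (transform each char, split on whitespace, dedup); objective: idiomatic, same cost.

-- ===== PORT A =====
-- Python's 'current' (a str grown by +=) is kept as a List Char and materialised with String.ofList
-- exactly where the Python adds it to the set; 'if current:' is 'current ≠ []'.
def gusStep (st : PySem.Set String × List Char) (c : Char) : PySem.Set String × List Char :=
  if PySem.Chars.isupper c then
    (if st.2 ≠ [] then PySem.Set.add st.1 (String.ofList st.2) else st.1, [c])
  else if PySem.Chars.islower c then
    (st.1, st.2 ++ [c])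
  else if st.2 ≠ [] then
    (PySem.Set.add st.1 (String.ofList st.2), [])
  else st

def get_unique_species_py (formula : String) : List String :=
  let st := formula.toList.foldl gusStep (PySem.Set.empty, [])
  if st.2 ≠ [] then PySem.Set.add st.1 (String.ofList st.2) else st.1

-- ===== PORT B =====
-- ' ' + c if c.isupper() else (c if c.islower() else ' '), joined over the formula
def gusTransform (cs : List Char) : List Char :=
  cs.flatMap (fun c =>
    if PySem.Chars.isupper c then [' ', c]
    else if PySem.Chars.islower c then [c]
    else [' '])

def get_unique_species_py_alt (formula : String) : List String :=
  PySem.Set.ofList ((PySem.Chars.split₀ (gusTransform formula.toList)).map String.ofList)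

-- ===== PRECONDITION & SPEC =====
def Spec_get_unique_species_py (formula : String) (out : List String) : Prop := out = get_unique_species_py_alt formula
instance (formula : String) (out : List String) : Decidable (Spec_get_unique_species_py formula out) := by unfold Spec_get_unique_species_py; infer_instance

-- ===== CLAIM (what is proved, stated in full; the proofs are below) =====
def Claim_equal_get_unique_species_py : Prop := ∀ (formula : String), Dom_get_unique_species_py formula → Spec_get_unique_species_py formula (get_unique_species_py formula)

-- ===== LEMMAS AND PROOFS =====

-- The token sequence both programs produce: the pending word 'cur' plus the words of 'cs'.
def gusTok : List Char → List Char → List (List Char)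
  | cur, [] => if cur = [] then [] else [cur]
  | cur, c :: cs =>
    if PySem.Chars.isupper c then
      (if cur = [] then gusTok [c] cs else cur :: gusTok [c] cs)
    else if PySem.Chars.islower c then gusTok (cur ++ [c]) cs
    else if cur = [] then gusTok [] cs else cur :: gusTok [] cs

theorem gus_isupper_not_space {c : Char} (h : PySem.Chars.isupper c = true) :
    PySem.Chars.isspace c = false := by
  simp only [PySem.Chars.isupper, Bool.and_eq_true, decide_eq_true_eq] at h
  have h1 : 65 ≤ c.toNat := h.1
  have h2 : c.toNat ≤ 90 := h.2
  simp only [PySem.Chars.isspace]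
  simp only [Bool.or_eq_false_iff, Bool.and_eq_false_iff, decide_eq_false_iff_not]
  omega

theorem gus_islower_not_space {c : Char} (h : PySem.Chars.islower c = true) :
    PySem.Chars.isspace c = false := by
  simp only [PySem.Chars.islower, Bool.and_eq_true, decide_eq_true_eq] at h
  have h1 : 97 ≤ c.toNat := h.1
  have h2 : c.toNat ≤ 122 := h.2
  simp only [PySem.Chars.isspace]
  simp only [Bool.or_eq_false_iff, Bool.and_eq_false_iff, decide_eq_false_iff_not]
  omega

-- A's loop (with its final flush) folds the set-add over the token sequence.
theorem gusA_eq_tok (cs : List Char) : ∀ (sp : PySem.Set String) (cur : List Char),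
    (if (cs.foldl gusStep (sp, cur)).2 ≠ [] then
       PySem.Set.add (cs.foldl gusStep (sp, cur)).1 (String.ofList (cs.foldl gusStep (sp, cur)).2)
     else (cs.foldl gusStep (sp, cur)).1)
    = (gusTok cur cs).foldl (fun s t => PySem.Set.add s (String.ofList t)) sp := by
  induction cs with
  | nil =>
    intro sp cur
    by_cases h : cur = [] <;> simp [gusTok, h, List.foldl]
  | cons c cs ih =>
    intro sp cur
    simp only [List.foldl_cons, gusStep, gusTok]
    by_cases hu : PySem.Chars.isupper c = true
    · by_cases hc : cur = [] <;> simp [hu, hc, ih]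
    · by_cases hl : PySem.Chars.islower c = true
      · simp [hu, hl, ih]
      · by_cases hc : cur = [] <;> simp [hu, hl, hc, ih]

-- split() of the transformed string, with a pending whitespace-free word, yields the same tokens.
theorem gus_go_tok (cs : List Char) : ∀ (cur : List Char) (acc : List (List Char)),
    (∀ c ∈ cur, PySem.Chars.isspace c = false) →
    PySem.Chars.split₀.go (gusTransform cs) cur.reverse acc = acc.reverse ++ gusTok cur cs := by
  induction cs with
  | nil =>
    intro cur acc hns
    by_cases h : cur = [] <;>
      simp [gusTransform, PySem.Chars.split₀.go, gusTok, h]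
  | cons c cs ih =>
    intro cur acc hns
    have hsp : PySem.Chars.isspace ' ' = true := by decide
    have htr : gusTransform (c :: cs) = (if PySem.Chars.isupper c = true then [' ', c]
        else if PySem.Chars.islower c = true then [c] else [' ']) ++ gusTransform cs := rfl
    rw [htr]
    simp only [gusTok]
    by_cases hu : PySem.Chars.isupper c = true
    · have hcs : PySem.Chars.isspace c = false := gus_isupper_not_space hu
      by_cases hc : cur = []
      · subst hc
        have := ih [c] acc (by intro x hx; simp at hx; subst hx; exact hcs)
        simp only [List.reverse_cons, List.reverse_nil, List.nil_append] at this
        simp [hu, PySem.Chars.split₀.go, hsp, hcs, this]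
      · have := ih [c] (cur :: acc) (by intro x hx; simp at hx; subst hx; exact hcs)
        simp only [List.reverse_cons, List.reverse_nil, List.nil_append] at this
        simp [hu, hc, PySem.Chars.split₀.go, hsp, hcs, this]
    · by_cases hl : PySem.Chars.islower c = true
      · have hcs : PySem.Chars.isspace c = false := gus_islower_not_space hl
        have := ih (cur ++ [c]) acc (by
          intro x hx
          rcases List.mem_append.mp hx with h | h
          · exact hns x h
          · simp at h; subst h; exact hcs)
        simp only [List.reverse_append, List.reverse_cons, List.reverse_nil,
          List.nil_append, List.cons_append] at this
        simp [hu, hl, PySem.Chars.split₀.go, hcs, this]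
      · by_cases hc : cur = []
        · subst hc
          have := ih [] acc (by intro x hx; simp at hx)
          simp only [List.reverse_nil] at this
          simp [hu, hl, PySem.Chars.split₀.go, hsp, this]
        · have := ih [] (cur :: acc) (by intro x hx; simp at hx)
          simp only [List.reverse_nil, List.reverse_cons] at this
          simp [hu, hl, hc, PySem.Chars.split₀.go, hsp, this]

theorem gus_split_transform (cs : List Char) :
    PySem.Chars.split₀ (gusTransform cs) = gusTok [] cs := by
  have := gus_go_tok cs [] [] (by intro x hx; simp at hx)
  simpa [PySem.Chars.split₀] using this

-- ===== VERDICT (by name: the statement is the Claim_ definition above) =====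
theorem get_unique_species_py_spec : Claim_equal_get_unique_species_py := by
  intro formula _
  show get_unique_species_py formula = get_unique_species_py_alt formula
  unfold get_unique_species_py get_unique_species_py_alt
  rw [gus_split_transform]
  rw [show PySem.Set.ofList ((gusTok [] formula.toList).map String.ofList)
        = ((gusTok [] formula.toList).map String.ofList).foldl PySem.Set.add PySem.Set.empty from rfl]
  rw [List.foldl_map]
  exact gusA_eq_tok formula.toList PySem.Set.empty []
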